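-- pv_equiv track=rewrite | github.com/Maarkh/ai_factory | archiv/ai_factory v14.py | extract_public_api
-- ===== SOURCE A (Python) =====
-- MAX_CONTEXT_CHARS   = 60_000
--
-- def extract_public_api(code: str) -> str:
--     api_lines: list[str] = []
--     total = 0
--     PUBLIC_PREFIXES = (
--         "import ", "from ", "class ", "def ",   # Python
--         "fn ", "pub fn ", "pub struct ", "pub enum ",  # Rust
--         "export ", "const ", "let ", "function ",      # TypeScript
--     )
--     for line in code.splitlines():
--         stripped = line.strip()
--         if stripped.startswith(PUBLIC_PREFIXES):
--             api_lines.append(line)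
--             total += len(line)
--         elif (
--             not line.startswith((" ", "\t"))
--             and "=" in stripped
--             and not stripped.startswith(("_", "#", "//"))
--         ):
--             api_lines.append(line)
--             total += len(line)
--         if total >= MAX_CONTEXT_CHARS:
--             api_lines.append("# [... обрезано ...]")
--             break
--     return "\n".join(api_lines)
-- ===== SOURCE B (Python) =====
-- MAX_CONTEXT_CHARS = 60_000
--
-- _PUBLIC_PREFIXES = (
--     "import ", "from ", "class ", "def ",
--     "fn ", "pub fn ", "pub struct ", "pub enum ",
--     "export ", "const ", "let ", "function ",
-- )
--
--
-- def _is_api_line(line: str) -> bool: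
--     stripped = line.strip()
--     return stripped.startswith(_PUBLIC_PREFIXES) or (
--         not line.startswith((" ", "\t"))
--         and "=" in stripped
--         and not stripped.startswith(("_", "#", "//"))
--     )
--
--
-- def extract_public_api(code: str) -> str:
--     api = [l for l in code.splitlines() if _is_api_line(l)]
--     # running character totals for the qualifying lines
--     sums = []
--     t = 0
--     for l in api:
--         t += len(l)
--         sums.append(t)
--     # binary search: smallest index whose running total reaches the cap
--     lo, hi = 0, len(sums)
--     while lo < hi:
--         mid = (lo + hi) // 2
--         if sums[mid] >= MAX_CONTEXT_CHARS:
--             hi = mid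
--         else:
--             lo = mid + 1
--     if lo < len(api):
--         return "\n".join(api[:lo + 1] + ["# [... обрезано ...]"])
--     return "\n".join(api)
-- ===== Notes on version B (the rewrite author's own statement) =====
-- stated objective: alternative
-- what changed: A's single loop that interleaves classification, length accumulation and the cap check is replaced by: filter the qualifying lines, build their running character totals, binary-search those monotone totals for the first index reaching the cap, and slice (plus marker) at that index.
import Mathlib
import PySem

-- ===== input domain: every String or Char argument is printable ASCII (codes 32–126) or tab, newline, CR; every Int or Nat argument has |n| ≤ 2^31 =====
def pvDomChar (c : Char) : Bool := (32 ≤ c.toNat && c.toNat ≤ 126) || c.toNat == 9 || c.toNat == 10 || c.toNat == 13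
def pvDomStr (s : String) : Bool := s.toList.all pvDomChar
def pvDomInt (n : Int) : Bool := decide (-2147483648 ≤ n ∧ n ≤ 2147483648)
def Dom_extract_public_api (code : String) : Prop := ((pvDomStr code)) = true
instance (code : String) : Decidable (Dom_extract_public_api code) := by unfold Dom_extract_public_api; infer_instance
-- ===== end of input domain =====

-- B replaces A's single interleaved loop (classify, accumulate, cap-check per line) by:
-- filter the qualifying lines, build their running character totals, binary-search the
-- monotone totals for the first index reaching the cap, slice there (objective: alternative).

-- ===== PORT A =====
-- A's tuple argument to stripped.startswith(PUBLIC_PREFIXES)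
def eapiPrefixHitA (stripped : String) : Bool :=
  PySem.Str.startswith stripped "import " || PySem.Str.startswith stripped "from " ||
  PySem.Str.startswith stripped "class " || PySem.Str.startswith stripped "def " ||
  PySem.Str.startswith stripped "fn " || PySem.Str.startswith stripped "pub fn " ||
  PySem.Str.startswith stripped "pub struct " || PySem.Str.startswith stripped "pub enum " ||
  PySem.Str.startswith stripped "export " || PySem.Str.startswith stripped "const " ||
  PySem.Str.startswith stripped "let " || PySem.Str.startswith stripped "function "

-- A's for-loop over code.splitlines(), state = (api_lines, total), break ⇒ return
def eapiLoopA : List String → List String → Int → List String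
  | [], apiLines, _ => apiLines
  | line :: rest, apiLines, total =>
    let stripped := PySem.Str.strip line
    if eapiPrefixHitA stripped then
      let apiLines := apiLines ++ [line]
      let total := total + PySem.Str.len line
      if (60000 : Int) ≤ total then apiLines ++ ["# [... обрезано ...]"]
      else eapiLoopA rest apiLines total
    else if !(PySem.Str.startswith line " " || PySem.Str.startswith line "\t") &&
            PySem.Str.isIn "=" stripped &&
            !(PySem.Str.startswith stripped "_" || PySem.Str.startswith stripped "#" ||
              PySem.Str.startswith stripped "//") then
      let apiLines := apiLines ++ [line]
      let total := total + PySem.Str.len line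
      if (60000 : Int) ≤ total then apiLines ++ ["# [... обрезано ...]"]
      else eapiLoopA rest apiLines total
    else
      if (60000 : Int) ≤ total then apiLines ++ ["# [... обрезано ...]"]
      else eapiLoopA rest apiLines total

def extract_public_api (code : String) : String :=
  PySem.Str.join "\n" (eapiLoopA (PySem.Str.splitlines code) [] 0)

-- ===== PORT B =====
-- _is_api_line from Source B
def eapiIsApiLineB (line : String) : Bool :=
  let stripped := PySem.Str.strip line
  (PySem.Str.startswith stripped "import " || PySem.Str.startswith stripped "from " ||
   PySem.Str.startswith stripped "class " || PySem.Str.startswith stripped "def " ||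
   PySem.Str.startswith stripped "fn " || PySem.Str.startswith stripped "pub fn " ||
   PySem.Str.startswith stripped "pub struct " || PySem.Str.startswith stripped "pub enum " ||
   PySem.Str.startswith stripped "export " || PySem.Str.startswith stripped "const " ||
   PySem.Str.startswith stripped "let " || PySem.Str.startswith stripped "function ") ||
  (!(PySem.Str.startswith line " " || PySem.Str.startswith line "\t") &&
   PySem.Str.isIn "=" stripped &&
   !(PySem.Str.startswith stripped "_" || PySem.Str.startswith stripped "#" ||
     PySem.Str.startswith stripped "//"))

-- Source B's "running character totals" loop (state t, appending t after each line)
def eapiSumsB : Int → List String → List Int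
  | _, [] => []
  | t, l :: rest => (t + PySem.Str.len l) :: eapiSumsB (t + PySem.Str.len l) rest

-- Source B's hand-written binary search: smallest index whose running total reaches the cap
def eapiBsearchB (sums : List Int) (lo hi : Nat) : Nat :=
  if h : lo < hi then
    if (60000 : Int) ≤ sums.getD ((lo + hi) / 2) 0 then eapiBsearchB sums lo ((lo + hi) / 2)
    else eapiBsearchB sums ((lo + hi) / 2 + 1) hi
  else lo
termination_by hi - lo
decreasing_by all_goals omega

def extract_public_api_alt (code : String) : String :=
  let api := (PySem.Str.splitlines code).filter eapiIsApiLineB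
  let sums := eapiSumsB 0 api
  let lo := eapiBsearchB sums 0 sums.length
  if lo < api.length then
    PySem.Str.join "\n" (api.take (lo + 1) ++ ["# [... обрезано ...]"])
  else
    PySem.Str.join "\n" api

-- ===== PRECONDITION & SPEC =====
def Spec_extract_public_api (code : String) (out : String) : Prop := out = extract_public_api_alt code
instance (code : String) (out : String) : Decidable (Spec_extract_public_api code out) := by unfold Spec_extract_public_api; infer_instance

-- ===== CLAIM (what is proved, stated in full; the proofs are below) =====
def Claim_equal_extract_public_api : Prop := ∀ (code : String), Dom_extract_public_api code → Spec_extract_public_api code (extract_public_api code)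

-- ===== LEMMAS AND PROOFS =====

-- Proof-only sequential cutoff: the common characterisation both programs reduce to.
def eapiTrunc : List String → Int → List String
  | [], _ => []
  | line :: rest, total =>
    if (60000 : Int) ≤ total + PySem.Str.len line then [line, "# [... обрезано ...]"]
    else line :: eapiTrunc rest (total + PySem.Str.len line)

theorem eapiSumsB_length (t : Int) (ls : List String) :
    (eapiSumsB t ls).length = ls.length := by
  induction ls generalizing t with
  | nil => rfl
  | cons l rest ih => simp [eapiSumsB, ih]

theorem eapiSumsB_ge_base (t : Int) (ls : List String) :
    ∀ k, k < ls.length → t ≤ (eapiSumsB t ls).getD k 0 := by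
  induction ls generalizing t with
  | nil => simp
  | cons l rest ih =>
    intro k hk
    have hlen : (0 : Int) ≤ PySem.Str.len l := by simp [PySem.Str.len_eq]
    cases k with
    | zero =>
      simp only [eapiSumsB, List.getD_cons_zero]
      omega
    | succ k =>
      have h1 := ih (t + PySem.Str.len l) k (by simpa using hk)
      simp only [eapiSumsB, List.getD_cons_succ]
      omega

theorem eapiSumsB_mono (t : Int) (ls : List String) :
    ∀ i j, i ≤ j → j < ls.length →
      (eapiSumsB t ls).getD i 0 ≤ (eapiSumsB t ls).getD j 0 := by
  induction ls generalizing t with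
  | nil => simp
  | cons l rest ih =>
    intro i j hij hj
    cases i with
    | zero =>
      cases j with
      | zero => exact le_refl _
      | succ j =>
        have h1 := eapiSumsB_ge_base (t + PySem.Str.len l) rest j (by simpa using hj)
        simpa only [eapiSumsB, List.getD_cons_zero, List.getD_cons_succ] using h1
    | succ i =>
      cases j with
      | zero => omega
      | succ j =>
        have h1 := ih (t + PySem.Str.len l) i j (by omega) (by simpa using hj)
        simpa only [eapiSumsB, List.getD_cons_succ] using h1

-- Source B's binary search returns the first index whose running total reaches the cap.
theorem eapiBsearchB_spec (sums : List Int)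
    (mono : ∀ i j, i ≤ j → j < sums.length →
      (60000 : Int) ≤ sums.getD i 0 → (60000 : Int) ≤ sums.getD j 0) :
    ∀ (d lo hi : Nat), hi - lo = d → lo ≤ hi → hi ≤ sums.length →
      (∀ k, k < lo → ¬ (60000 : Int) ≤ sums.getD k 0) →
      (∀ k, hi ≤ k → k < sums.length → (60000 : Int) ≤ sums.getD k 0) →
      eapiBsearchB sums lo hi ≤ sums.length ∧
      (∀ k, k < eapiBsearchB sums lo hi → ¬ (60000 : Int) ≤ sums.getD k 0) ∧
      (eapiBsearchB sums lo hi < sums.length →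
        (60000 : Int) ≤ sums.getD (eapiBsearchB sums lo hi) 0) := by
  intro d
  induction d using Nat.strong_induction_on with
  | _ d ih =>
    intro lo hi hd hle hhi hlow hhigh
    unfold eapiBsearchB
    split
    · rename_i hlt
      have hmid1 : lo ≤ (lo + hi) / 2 := by omega
      have hmid2 : (lo + hi) / 2 < hi := by omega
      split
      · rename_i hP
        exact ih ((lo + hi) / 2 - lo) (by omega) lo ((lo + hi) / 2) rfl hmid1 (by omega) hlow
          (fun k hk1 hk2 => mono ((lo + hi) / 2) k hk1 hk2 hP)
      · rename_i hP
        exact ih (hi - ((lo + hi) / 2 + 1)) (by omega) ((lo + hi) / 2 + 1) hi rfl (by omega) hhi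
          (fun k hk => by
            by_cases hklo : k < lo
            · exact hlow k hklo
            · intro hPk
              exact hP (mono k ((lo + hi) / 2) (by omega) (by omega) hPk))
          hhigh
    · rename_i hlt
      have : lo = hi := by omega
      exact ⟨by omega, hlow, fun h => hhigh lo (by omega) h⟩

-- The sequential cutoff equals "slice at the first index reaching the cap".
theorem eapiTrunc_eq_take (ls : List String) :
    ∀ (total : Int) (r : Nat), r ≤ ls.length →
      (∀ k, k < r → ¬ (60000 : Int) ≤ (eapiSumsB total ls).getD k 0) →
      (r < ls.length → (60000 : Int) ≤ (eapiSumsB total ls).getD r 0) →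
      eapiTrunc ls total =
        if r < ls.length then ls.take (r + 1) ++ ["# [... обрезано ...]"] else ls := by
  induction ls with
  | nil =>
    intro total r hr _ _
    simp [eapiTrunc]
  | cons l rest ih =>
    intro total r hr hlow hhigh
    by_cases hP : (60000 : Int) ≤ total + PySem.Str.len l
    · have hr0 : r = 0 := by
        by_contra h
        exact hlow 0 (by omega) (by simpa [eapiSumsB] using hP)
      subst hr0
      simp only [eapiTrunc, if_pos hP]
      simp
    · have hrpos : 1 ≤ r := by
        rcases Nat.eq_zero_or_pos r with h0 | h1
        · subst h0
          exact absurd (by simpa only [eapiSumsB, List.getD_cons_zero] using hhigh (by simp)) hP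
        · exact h1
      have := ih (total + PySem.Str.len l) (r - 1) (by simp at hr; omega)
        (fun k hk => by
          have h1 := hlow (k + 1) (by omega)
          simpa only [eapiSumsB, List.getD_cons_succ] using h1)
        (fun hrl => by
          have h1 := hhigh (by simp; omega)
          have hidx : r = (r - 1) + 1 := by omega
          rw [hidx] at h1
          simpa only [eapiSumsB, List.getD_cons_succ] using h1)
      simp only [eapiTrunc, if_neg hP, this]
      rcases Nat.lt_or_ge (r - 1) rest.length with hcase | hcase
      · rw [if_pos hcase, if_pos (by simp; omega)]
        have : r + 1 = (r - 1 + 1) + 1 := by omega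
        simp [this, List.take_succ_cons]
      · rw [if_neg (by omega), if_neg (by simp; omega)]

-- A's interleaved loop below the cap = accumulator ++ the sequential cutoff of the filtered remainder.
theorem eapiLoopA_eq (ls : List String) :
    ∀ (acc : List String) (total : Int), total < 60000 →
      eapiLoopA ls acc total = acc ++ eapiTrunc (ls.filter eapiIsApiLineB) total := by
  induction ls with
  | nil => intro acc total _; simp [eapiLoopA, eapiTrunc]
  | cons line rest ih =>
    intro acc total htot
    by_cases h1 : eapiPrefixHitA (PySem.Str.strip line) = true
    · have hp : eapiIsApiLineB line = true := by
        unfold eapiIsApiLineB; unfold eapiPrefixHitA at h1; simp_all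
      simp only [eapiLoopA, h1, if_true, List.filter_cons, hp, eapiTrunc,
        PySem.Str.len_eq]
      split_ifs with h2
      · simp
      · rw [ih _ _ (by omega)]; simp
    · by_cases hc : (!(PySem.Str.startswith line " " || PySem.Str.startswith line "\t") &&
            PySem.Str.isIn "=" (PySem.Str.strip line) &&
            !(PySem.Str.startswith (PySem.Str.strip line) "_" ||
              PySem.Str.startswith (PySem.Str.strip line) "#" ||
              PySem.Str.startswith (PySem.Str.strip line) "//")) = true
      · have hp : eapiIsApiLineB line = true := by
          unfold eapiIsApiLineB; simp_all
        simp only [eapiLoopA, if_neg h1, hc, if_true, List.filter_cons, hp, eapiTrunc,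
          PySem.Str.len_eq]
        split_ifs with h2
        · simp
        · rw [ih _ _ (by omega)]; simp
      · have hp : eapiIsApiLineB line = false := by
          unfold eapiIsApiLineB; unfold eapiPrefixHitA at h1; simp_all
        simp only [eapiLoopA, if_neg h1, if_neg hc, if_neg (by omega : ¬ (60000 : Int) ≤ total),
          List.filter_cons, hp, Bool.false_eq_true, if_false]
        exact ih _ _ htot

-- ===== VERDICT (by name: the statement is the Claim_ definition above) =====
theorem extract_public_api_spec : Claim_equal_extract_public_api := by
  intro code _
  unfold Spec_extract_public_api extract_public_api extract_public_api_alt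
  rw [eapiLoopA_eq _ [] 0 (by omega)]
  set api := (PySem.Str.splitlines code).filter eapiIsApiLineB with hapi
  set sums := eapiSumsB 0 api with hsums
  have hlen : sums.length = api.length := eapiSumsB_length 0 api
  have mono : ∀ i j, i ≤ j → j < sums.length →
      (60000 : Int) ≤ sums.getD i 0 → (60000 : Int) ≤ sums.getD j 0 :=
    fun i j hij hj hPi => le_trans hPi (eapiSumsB_mono 0 api i j hij (hlen ▸ hj))
  obtain ⟨hr1, hr2, hr3⟩ := eapiBsearchB_spec sums mono sums.length 0 sums.length rfl
    (Nat.zero_le _) le_rfl (by omega) (fun k hk1 hk2 => by omega)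
  rw [eapiTrunc_eq_take api 0 (eapiBsearchB sums 0 sums.length) (hlen ▸ hr1)
    hr2 (fun h => hr3 (hlen ▸ h))]
  simp only [hsums, List.nil_append]
  by_cases hc : eapiBsearchB (eapiSumsB 0 api) 0 (eapiSumsB 0 api).length < api.length
  · simp [hc]
  · simp [hc]
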